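-- pv_equiv track=rewrite | github.com/davidballezaa/TC2038 | decrement_and_conquer/fake-coin.py | encontrar_moneda_falsa
-- ===== SOURCE A (Python) =====
-- def encontrar_moneda_falsa(monedas, inicio=0, moneda_legitima=None):
--     """
--     Encuentra la moneda falsa en un conjunto de monedas.
--
--     Parámetros:
--     monedas (list): Lista de pesos de las monedas. Se asume que una sola moneda tiene un peso diferente.
--     inicio (int): Índice de inicio para ajustar la posición de la moneda en la lista original.
--     moneda_legitima (int): Peso de una moneda que se sabe legítima, para comparación.
--
--     Retorna:
--     int: El índice de la moneda falsa en la lista original.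
--     """
--
--     n = len(monedas)
--
--     # Caso base: si solo queda una moneda, esa es la falsa
--     if n == 1:
--         return inicio
--
--     # Caso especial: si quedan dos monedas, comparamos con una moneda legítima
--     if n == 2:
--         if moneda_legitima is not None:
--             if monedas[0] == moneda_legitima:
--                 return inicio + 1  # La segunda moneda es la falsa
--             else:
--                 return inicio  # La primera moneda es la falsa
--         else:
--             # Si no tenemos una moneda legítima, usamos cualquier otra del tercer grupo.
--             return inicio if monedas[0] != monedas[1] else inicio + 1
--
--     # Divide el conjunto de monedas en tres grupos
--     tercio = n // 3
--
--     grupo1 = monedas[:tercio]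
--     grupo2 = monedas[tercio:2*tercio]
--     grupo3 = monedas[2*tercio:] if 2*tercio < n else []
--
--     # Compara los pesos de los dos primeros grupos usando una balanza imaginaria
--     peso_grupo1 = sum(grupo1)
--     peso_grupo2 = sum(grupo2)
--
--     if peso_grupo1 == peso_grupo2:
--         # La moneda falsa está en el tercer grupo (los otros dos tienen el mismo peso)
--         # Usamos una moneda del grupo 1 como moneda legítima para la siguiente comparación
--         return encontrar_moneda_falsa(grupo3, inicio + 2 * tercio, grupo1[0])
--     else:
--         # La moneda falsa está en el grupo1 o grupo2
--         # Usamos una moneda del tercer grupo si no está vacío como legítima, porque no ha sido comparado,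
--         # o en caso de que no exista un tercer grupo, continuamos la búsqueda.
--         return encontrar_moneda_falsa(grupo1 + grupo2, inicio, grupo3[0] if grupo3 else None)
-- ===== SOURCE B (Python) =====
-- def encontrar_moneda_falsa(monedas, inicio=0, moneda_legitima=None):
--     """Iterative version: the working set is always a contiguous window
--     monedas[lo:hi] of the ORIGINAL list, so instead of rebuilding sublists we
--     keep two indices and read group weights from a prefix-sum table built once."""
--     pref = [0]
--     s = 0
--     for p in monedas:
--         s += p
--         pref.append(s)
--     lo, hi = 0, len(monedas)
--     legit = moneda_legitima
--     while True:
--         n = hi - lo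
--         if n == 1:
--             return inicio + lo
--         if n == 2:
--             if legit is not None:
--                 return inicio + lo + 1 if monedas[lo] == legit else inicio + lo
--             return inicio + lo if monedas[lo] != monedas[lo + 1] else inicio + lo + 1
--         tercio = n // 3
--         mid = lo + tercio
--         if pref[mid] - pref[lo] == pref[mid + tercio] - pref[mid]:
--             legit = monedas[lo]          # raises IndexError on empty input, like A
--             lo += 2 * tercio
--         else:
--             legit = monedas[lo + 2 * tercio] if lo + 2 * tercio < hi else None
--             hi = lo + 2 * tercio
-- ===== Notes on version B (the rewrite author's own statement) =====
-- stated objective: alternative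
-- what changed: A recursively rebuilds sublists (slicing and concatenating groups at every level); B is an iterative loop that keeps only an index window [lo, hi) into the original list and reads each group's weight from a prefix-sum table built once, so no intermediate lists are created.
-- outside the precondition, e.g. on encontrar_moneda_falsa([], 0, None): A raises IndexError, B raises IndexError
import Mathlib
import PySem

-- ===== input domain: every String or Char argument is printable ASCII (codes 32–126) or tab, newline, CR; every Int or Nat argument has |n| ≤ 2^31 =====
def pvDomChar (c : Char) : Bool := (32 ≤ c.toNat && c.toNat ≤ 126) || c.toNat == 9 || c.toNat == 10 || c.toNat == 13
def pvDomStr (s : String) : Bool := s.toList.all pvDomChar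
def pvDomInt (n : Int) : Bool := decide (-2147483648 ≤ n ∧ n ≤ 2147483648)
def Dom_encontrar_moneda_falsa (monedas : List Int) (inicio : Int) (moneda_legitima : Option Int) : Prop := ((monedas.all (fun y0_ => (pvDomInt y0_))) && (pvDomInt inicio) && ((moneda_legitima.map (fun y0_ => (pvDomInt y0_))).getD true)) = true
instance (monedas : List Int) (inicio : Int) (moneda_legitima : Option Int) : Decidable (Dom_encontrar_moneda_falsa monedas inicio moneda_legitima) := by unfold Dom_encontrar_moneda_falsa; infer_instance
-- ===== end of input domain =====

-- B replaces A's recursion on freshly built sublists by a loop over an index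
-- window into the original list, reading group weights from a prefix-sum table
-- built once (objective: alternative decomposition; no speed claim).

-- ===== PORT A =====
-- fuel only makes the recursion total; monedas.length + 1 levels always
-- suffice (each level shrinks a nonempty list), the 0-fuel default 0 is
-- unreachable under Pre_.
def pvA (fuel : Nat) (monedas : List Int) (inicio : Int) (moneda_legitima : Option Int) : Int :=
  match fuel with
  | 0 => 0
  | f + 1 =>
    let n := monedas.length
    if n = 1 then inicio
    else if n = 2 then
      match moneda_legitima with
      | some m =>
          if PySem.List.pyGetD monedas (0 : Int) 0 = m then inicio + 1 else inicio
      | none =>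
          if PySem.List.pyGetD monedas (0 : Int) 0 ≠ PySem.List.pyGetD monedas (1 : Int) 0
          then inicio else inicio + 1
    else
      let tercio := n / 3
      let grupo1 := PySem.List.slice monedas (some (0 : Int)) (some (tercio : Int))
      let grupo2 := PySem.List.slice monedas (some (tercio : Int)) (some ((2 * tercio : Nat) : Int))
      let grupo3 := if 2 * tercio < n then PySem.List.slice monedas (some ((2 * tercio : Nat) : Int)) none else []
      if grupo1.sum = grupo2.sum then
        match PySem.List.pyGet? grupo1 (0 : Int) with
        | none => 0   -- Python raises IndexError here (grupo1 empty); outside Pre_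
        | some g => pvA f grupo3 (inicio + 2 * tercio) (some g)
      else
        pvA f (grupo1 ++ grupo2) inicio grupo3.head?

def encontrar_moneda_falsa (monedas : List Int) (inicio : Int) (moneda_legitima : Option Int) : Int :=
  pvA (monedas.length + 1) monedas inicio moneda_legitima

-- ===== PORT B =====
-- the prefix-sum table: pref = [0]; s = 0; for p in monedas: s += p; pref.append(s)
def pvPref (monedas : List Int) : List Int :=
  (monedas.foldl (fun (st : List Int × Int) p => (st.1 ++ [st.2 + p], st.2 + p)) ([0], 0)).1

-- the while-True loop over the window [lo, hi); fuel is a totality guard only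
def pvBLoop (fuel : Nat) (monedas pref : List Int) (inicio : Int) (lo hi : Nat)
    (legit : Option Int) : Int :=
  match fuel with
  | 0 => 0
  | f + 1 =>
    let n := hi - lo
    if n = 1 then inicio + lo
    else if n = 2 then
      match legit with
      | some m =>
          if PySem.List.pyGetD monedas (lo : Int) 0 = m then inicio + lo + 1 else inicio + lo
      | none =>
          if PySem.List.pyGetD monedas (lo : Int) 0 ≠ PySem.List.pyGetD monedas ((lo : Int) + 1) 0
          then inicio + lo else inicio + lo + 1
    else
      let tercio := n / 3
      let mid := lo + tercio
      if PySem.List.pyGetD pref (mid : Int) 0 - PySem.List.pyGetD pref (lo : Int) 0 =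
         PySem.List.pyGetD pref ((mid + tercio : Nat) : Int) 0 - PySem.List.pyGetD pref (mid : Int) 0 then
        match PySem.List.pyGet? monedas (lo : Int) with
        | none => 0   -- Python raises IndexError here; outside Pre_
        | some g => pvBLoop f monedas pref inicio (lo + 2 * tercio) hi (some g)
      else
        pvBLoop f monedas pref inicio lo (lo + 2 * tercio)
          (if lo + 2 * tercio < hi then some (PySem.List.pyGetD monedas ((lo + 2 * tercio : Nat) : Int) 0) else none)

def encontrar_moneda_falsa_alt (monedas : List Int) (inicio : Int) (moneda_legitima : Option Int) : Int :=
  pvBLoop (monedas.length + 1) monedas (pvPref monedas) inicio 0 monedas.length moneda_legitima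

-- ===== PRECONDITION & SPEC =====
-- Pre_ excludes only the empty list, on which both Pythons raise IndexError.
def Pre_encontrar_moneda_falsa (monedas : List Int) (inicio : Int) (moneda_legitima : Option Int) : Prop :=
  monedas ≠ []
instance (monedas : List Int) (inicio : Int) (moneda_legitima : Option Int) : Decidable (Pre_encontrar_moneda_falsa monedas inicio moneda_legitima) := by unfold Pre_encontrar_moneda_falsa; infer_instance

def pvWitness_encontrar_moneda_falsa : List Int × Int × Option Int := ([1, 1, 2, 1], 0, none)

def Spec_encontrar_moneda_falsa (monedas : List Int) (inicio : Int) (moneda_legitima : Option Int) (out : Int) : Prop := out = encontrar_moneda_falsa_alt monedas inicio moneda_legitima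
instance (monedas : List Int) (inicio : Int) (moneda_legitima : Option Int) (out : Int) : Decidable (Spec_encontrar_moneda_falsa monedas inicio moneda_legitima out) := by unfold Spec_encontrar_moneda_falsa; infer_instance

-- ===== CLAIM (what is proved, stated in full; the proofs are below) =====
def Claim_equal_encontrar_moneda_falsa : Prop := ∀ (monedas : List Int) (inicio : Int) (moneda_legitima : Option Int), Dom_encontrar_moneda_falsa monedas inicio moneda_legitima → Pre_encontrar_moneda_falsa monedas inicio moneda_legitima → Spec_encontrar_moneda_falsa monedas inicio moneda_legitima (encontrar_moneda_falsa monedas inicio moneda_legitima)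

-- ===== LEMMAS AND PROOFS =====

-- running partial sums, used to characterise pvPref
def pvPrefs : List Int → Int → List Int
  | [], _ => []
  | p :: xs, s => (s + p) :: pvPrefs xs (s + p)

lemma pvPref_foldl (xs : List Int) : ∀ (acc : List Int) (s : Int),
    xs.foldl (fun (st : List Int × Int) p => (st.1 ++ [st.2 + p], st.2 + p)) (acc, s)
      = (acc ++ pvPrefs xs s, s + xs.sum) := by
  induction xs with
  | nil => intro acc s; simp [pvPrefs]
  | cons p xs ih =>
      intro acc s
      simp only [List.foldl_cons, ih, pvPrefs, List.sum_cons, Prod.mk.injEq]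
      refine ⟨by simp, by ring⟩

lemma pvPrefs_getD (xs : List Int) : ∀ (s : Int) (k : Nat), k < xs.length →
    (pvPrefs xs s).getD k 0 = s + (xs.take (k + 1)).sum := by
  induction xs with
  | nil => intro s k hk; simp at hk
  | cons p xs ih =>
      intro s k hk
      cases k with
      | zero => simp [pvPrefs]
      | succ j =>
          simp only [pvPrefs, List.getD_cons_succ, List.take_succ_cons, List.sum_cons]
          rw [ih (s + p) j (by simpa using hk)]
          ring

lemma pvPref_getD (xs : List Int) (k : Nat) (hk : k ≤ xs.length) :
    (pvPref xs).getD k 0 = (xs.take k).sum := by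
  unfold pvPref
  rw [pvPref_foldl]
  cases k with
  | zero => simp
  | succ j =>
      have hj : j < xs.length := by omega
      simp only [List.cons_append, List.nil_append, List.getD_cons_succ]
      rw [pvPrefs_getD xs 0 j hj]
      simp

-- sum of a window from the prefix table
lemma pvPref_window (xs : List Int) (a b : Nat) (hab : a ≤ b) (hb : b ≤ xs.length) :
    (pvPref xs).getD b 0 - (pvPref xs).getD a 0 = ((xs.drop a).take (b - a)).sum := by
  rw [pvPref_getD xs a (le_trans hab hb), pvPref_getD xs b hb]
  have h : xs.take b = xs.take a ++ (xs.drop a).take (b - a) := by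
    have := List.take_add (l := xs) (i := a) (j := b - a)
    rwa [Nat.add_sub_cancel' hab] at this
  rw [h, List.sum_append]
  ring

-- the main correspondence
-- : B's loop over the window [lo, hi) computes what A
-- computes on the sublist monedas[lo:hi] with inicio shifted by lo.
lemma pvLoop_eq_pvA (monedas : List Int) (inicio : Int) :
    ∀ (fuel : Nat) (lo hi : Nat) (legit : Option Int),
      lo < hi → hi ≤ monedas.length →
      pvBLoop fuel monedas (pvPref monedas) inicio lo hi legit
        = pvA fuel ((monedas.drop lo).take (hi - lo)) (inicio + lo) legit := by
  intro fuel
  induction fuel with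
  | zero => intro lo hi legit _ _; rfl
  | succ f ih =>
      intro lo hi legit hlt hhi
      have hlen : ((monedas.drop lo).take (hi - lo)).length = hi - lo := by
        simp; omega
      have hget : ∀ (k : Nat), lo + k < hi →
          ((monedas.drop lo).take (hi - lo)).getD k 0 = monedas.getD (lo + k) 0 := by
        intro k hk
        rw [List.getD_eq_getElem _ _ (by omega), List.getD_eq_getElem _ _ (by omega)]
        simp [List.getElem_take, List.getElem_drop]
      simp only [pvBLoop, pvA, hlen]
      by_cases h1 : hi - lo = 1
      · simp [h1]
      by_cases h2 : hi - lo = 2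
      · have hk0 := hget 0 (by omega)
        have hk1 := hget 1 (by omega)
        rw [h2] at hk0 hk1
        simp only [Nat.add_zero] at hk0
        have hcast : ((lo : Int) + 1) = ((lo + 1 : Nat) : Int) := by push_cast; ring
        cases legit with
        | none =>
            simp only [h2, reduceIte, hcast, PySem.List.pyGetD_natCast,
              PySem.List.pyGetD_ofNat', hk0, hk1]
        | some m =>
            simp only [h2, reduceIte, PySem.List.pyGetD_natCast,
              PySem.List.pyGetD_ofNat', hk0]
      · -- n ≥ 3
        have hn3 : 3 ≤ hi - lo := by omega
        set n := hi - lo with hn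
        set t := n / 3 with ht
        have ht1 : 1 ≤ t := Nat.le_div_iff_mul_le (by norm_num) |>.mpr (by omega)
        have h2t : 2 * t < n := by
          have := Nat.div_mul_le_self n 3
          omega
        simp only [h1, h2, reduceIte, PySem.List.pyGetD_natCast]
        rw [if_pos h2t]
        -- the three groups of the A-side sublist, as windows of monedas
        have hg1 : PySem.List.slice ((monedas.drop lo).take n) (some (0 : Int)) (some (t : Int))
            = (monedas.drop lo).take t := by
          rw [PySem.List.slice_zero_start, PySem.List.slice_to_natCast, List.take_take]
          congr 1; omega
        have hg2 : PySem.List.slice ((monedas.drop lo).take n) (some (t : Int)) (some ((2 * t : Nat) : Int))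
            = (monedas.drop (lo + t)).take t := by
          rw [PySem.List.slice_natCast, List.drop_take, List.take_take, List.drop_drop]
          rw [show min (2 * t - t) (n - t) = t from by omega]
        have hg3 : PySem.List.slice ((monedas.drop lo).take n) (some ((2 * t : Nat) : Int)) none
            = (monedas.drop (lo + 2 * t)).take (n - 2 * t) := by
          rw [PySem.List.slice_from_natCast, List.drop_take, List.drop_drop]
        -- group weights come out of the prefix table
        have hs1 : (pvPref monedas).getD (lo + t) 0 - (pvPref monedas).getD lo 0
            = ((monedas.drop lo).take t).sum := by
          have := pvPref_window monedas lo (lo + t) (by omega) (by omega)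
          simpa using this
        have hs2 : (pvPref monedas).getD (lo + t + t) 0 - (pvPref monedas).getD (lo + t) 0
            = ((monedas.drop (lo + t)).take t).sum := by
          have := pvPref_window monedas (lo + t) (lo + t + t) (by omega) (by omega)
          simpa using this
        rw [hg1, hg2, hg3, hs1, hs2]
        have hx : lo < monedas.length := by omega
        by_cases hw : ((monedas.drop lo).take t).sum = ((monedas.drop (lo + t)).take t).sum
        · -- equal: the fake coin is in the third group
          rw [if_pos hw, if_pos hw]
          have hA0 : PySem.List.pyGet? ((monedas.drop lo).take t) (0 : Int)
              = some (monedas.getD lo 0) := by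
            rw [PySem.List.pyGet?_zero]
            have hlen1 : 0 < ((monedas.drop lo).take t).length := by simp; omega
            rw [List.getElem?_eq_getElem hlen1]
            rw [List.getD_eq_getElem _ _ hx]
            simp [List.getElem_take, List.getElem_drop]
          have hB0 : PySem.List.pyGet? monedas ((lo : Nat) : Int) = some (monedas.getD lo 0) := by
            rw [PySem.List.pyGet?_natCast, List.getElem?_eq_getElem hx, List.getD_eq_getElem _ _ hx]
          rw [hA0, hB0]
          dsimp only
          rw [ih (lo + 2 * t) hi (some (monedas.getD lo 0)) (by omega) hhi]
          rw [show hi - (lo + 2 * t) = n - 2 * t from by omega,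
              show inicio + ((lo + 2 * t : Nat) : Int) = inicio + (lo : Int) + 2 * (t : Int) from by push_cast; ring]
        · -- unequal: the fake coin is in the first two groups
          rw [if_neg hw, if_neg hw]
          have hcat : (monedas.drop lo).take t ++ (monedas.drop (lo + t)).take t
              = (monedas.drop lo).take (2 * t) := by
            rw [two_mul, List.take_add, List.drop_drop]
          have h2tlt : lo + 2 * t < hi := by omega
          have hlt2 : lo + 2 * t < monedas.length := by omega
          have hhd : ((monedas.drop (lo + 2 * t)).take (n - 2 * t)).head?
              = some (monedas.getD (lo + 2 * t) 0) := by
            have hstep : (monedas.drop (lo + 2 * t)).take (n - 2 * t)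
                = monedas[lo + 2 * t] :: ((monedas.drop (lo + 2 * t + 1)).take (n - 2 * t - 1)) := by
              rw [List.drop_eq_getElem_cons hlt2, List.take_cons (by omega)]
            rw [hstep, List.head?_cons, List.getD_eq_getElem _ _ hlt2]
          rw [hcat, hhd, if_pos h2tlt]
          rw [ih lo (lo + 2 * t) (some (monedas.getD (lo + 2 * t) 0)) (by omega) (by omega)]
          rw [show lo + 2 * t - lo = 2 * t from by omega]

-- ===== VERDICT (by name: the statement is the Claim_ definition above) =====
theorem encontrar_moneda_falsa_spec : Claim_equal_encontrar_moneda_falsa := by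
  intro monedas inicio legit _ hpre
  unfold Spec_encontrar_moneda_falsa encontrar_moneda_falsa encontrar_moneda_falsa_alt
  have hlen : 0 < monedas.length := List.length_pos_iff.mpr hpre
  rw [pvLoop_eq_pvA monedas inicio (monedas.length + 1) 0 monedas.length legit hlen le_rfl]
  simp
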